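-- pv_equiv track=rewrite | github.com/adrmisty/hmm-pos-tagger | heuristics.py | _multiword_entities
-- ===== SOURCE A (Python) =====
-- from typing import List, Tuple
--
-- TaggedSentence = List[Tuple[str, str]]
--
-- def _multiword_entities(sentence: TaggedSentence) -> TaggedSentence:
--     """
--     Heuristic: Promotes a NOUN to PROPN if it is bordered by a PROPN.
--     Extended this for >2 length.
--     Example: "New (PROPN) York (NOUN)" -> "New (PROPN) York (PROPN)"
--     """
--     new_sentence = []
--
--
--     for i, (word, tag) in enumerate(sentence):
--         new_tag = tag
--
--         if tag == 'NOUN':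
--             prev_is_propn = (sentence[i - 1][1] == 'PROPN') if i > 0 else False
--             next_is_propn = (sentence[i + 1][1] == 'PROPN') if i < len(sentence) - 1 else False
--
--             # If surrounded or attached to a PROPN, assume it is part of the entity
--             if prev_is_propn or next_is_propn:
--                 new_tag = 'PROPN'
--
--         new_sentence.append((word, new_tag))
--
--     return new_sentence
-- ===== SOURCE B (Python) =====
-- def _multiword_entities(sentence):
--     """Anchor-driven rewrite: collect indices promoted by adjacent PROPN anchors,
--     then rebuild the sentence in one comprehension."""
--     n = len(sentence)
--     promoted = set()
--     for i, (_, tag) in enumerate(sentence):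
--         if tag == 'PROPN':
--             if i > 0 and sentence[i - 1][1] == 'NOUN':
--                 promoted.add(i - 1)
--             if i < n - 1 and sentence[i + 1][1] == 'NOUN':
--                 promoted.add(i + 1)
--     return [(word, 'PROPN' if tag == 'PROPN' or i in promoted else tag)
--             for i, (word, tag) in enumerate(sentence)]
-- ===== Notes on version B (the rewrite author's own statement) =====
-- stated objective: alternative
-- what changed: Instead of checking each word's two neighbours per position, B iterates over PROPN anchors, spreads promotion outward into a set of promoted indices, and rebuilds the sentence in a second pass from that set and the original tags.
import Mathlib
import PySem

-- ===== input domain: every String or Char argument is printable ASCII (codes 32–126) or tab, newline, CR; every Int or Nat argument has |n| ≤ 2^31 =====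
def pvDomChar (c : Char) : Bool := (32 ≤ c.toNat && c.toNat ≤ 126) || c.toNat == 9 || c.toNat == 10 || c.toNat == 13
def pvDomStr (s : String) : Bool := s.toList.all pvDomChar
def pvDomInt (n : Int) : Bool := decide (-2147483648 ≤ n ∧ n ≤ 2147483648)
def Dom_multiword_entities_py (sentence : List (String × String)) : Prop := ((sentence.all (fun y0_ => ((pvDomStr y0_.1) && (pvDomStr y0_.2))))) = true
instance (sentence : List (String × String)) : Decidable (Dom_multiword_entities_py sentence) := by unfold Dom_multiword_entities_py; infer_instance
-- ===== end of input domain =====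

-- B rebuilds the sentence from a set of indices promoted by PROPN anchors spreading
-- to NOUN neighbours, instead of per-word neighbour checks; alternative decomposition, same cost.


-- ===== PORT A =====
def multiword_entities_py (sentence : List (String × String)) : List (String × String) :=
  (PySem.List.enumerate sentence).foldl (fun new_sentence p =>
    let i := p.1
    let word := p.2.1
    let tag := p.2.2
    let new_tag :=
      if tag == "NOUN" then
        let prev_is_propn :=
          if i > 0 then (PySem.List.pyGetD sentence (i - 1) ("", "")).2 == "PROPN" else false
        let next_is_propn :=
          if i < (sentence.length : Int) - 1 then
            (PySem.List.pyGetD sentence (i + 1) ("", "")).2 == "PROPN" else false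
        if prev_is_propn || next_is_propn then "PROPN" else tag
      else tag
    new_sentence ++ [(word, new_tag)]) []

-- ===== PORT B =====
-- the loop body collecting promoted indices from a PROPN anchor at index i
def pvStepB (sentence : List (String × String)) (promoted : PySem.Set Int)
    (p : Int × (String × String)) : PySem.Set Int :=
  let i := p.1
  let tag := p.2.2
  if tag == "PROPN" then
    let promoted :=
      if i > 0 && (PySem.List.pyGetD sentence (i - 1) ("", "")).2 == "NOUN" then
        PySem.Set.add promoted (i - 1) else promoted
    if i < (sentence.length : Int) - 1 &&
        (PySem.List.pyGetD sentence (i + 1) ("", "")).2 == "NOUN" then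
      PySem.Set.add promoted (i + 1) else promoted
  else promoted

def multiword_entities_py_alt (sentence : List (String × String)) : List (String × String) :=
  let promoted : PySem.Set Int :=
    (PySem.List.enumerate sentence).foldl (pvStepB sentence) PySem.Set.empty
  (PySem.List.enumerate sentence).map (fun p =>
    (p.2.1, if p.2.2 == "PROPN" || PySem.Set.contains promoted p.1 then "PROPN" else p.2.2))

-- ===== PRECONDITION & SPEC =====
def Spec_multiword_entities_py (sentence : List (String × String)) (out : List (String × String)) : Prop := out = multiword_entities_py_alt sentence
instance (sentence : List (String × String)) (out : List (String × String)) : Decidable (Spec_multiword_entities_py sentence out) := by unfold Spec_multiword_entities_py; infer_instance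

-- ===== CLAIM (what is proved, stated in full; the proofs are below) =====
def Claim_equal_multiword_entities_py : Prop := ∀ (sentence : List (String × String)), Dom_multiword_entities_py sentence → Spec_multiword_entities_py sentence (multiword_entities_py sentence)

-- ===== LEMMAS AND PROOFS =====

-- the condition under which pvStepB at entry q adds index x to the set
def PromCond (s : List (String × String)) (q : Int × (String × String)) (x : Int) : Prop :=
  q.2.2 = "PROPN" ∧
    ((q.1 > 0 ∧ (PySem.List.pyGetD s (q.1 - 1) ("", "")).2 = "NOUN" ∧ x = q.1 - 1) ∨
     (q.1 < (s.length : Int) - 1 ∧ (PySem.List.pyGetD s (q.1 + 1) ("", "")).2 = "NOUN" ∧ x = q.1 + 1))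

theorem mem_pvStepB (s : List (String × String)) (init : PySem.Set Int)
    (q : Int × (String × String)) (x : Int) :
    x ∈ pvStepB s init q ↔ x ∈ init ∨ PromCond s q x := by
  simp only [pvStepB, PromCond]
  split_ifs with h1 h2 h3 h4 <;>
    simp_all only [PySem.Set.mem_add, beq_iff_eq, Bool.and_eq_true, decide_eq_true_eq,
      not_and] <;>
    constructor <;> intro h <;> try tauto

theorem mem_foldl_pvStepB (s : List (String × String)) (l : List (Int × (String × String)))
    (init : PySem.Set Int) (x : Int) :
    x ∈ l.foldl (pvStepB s) init ↔ x ∈ init ∨ ∃ p ∈ l, PromCond s p x := by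
  induction l generalizing init with
  | nil => simp
  | cons q l ih =>
    rw [List.foldl_cons, ih]
    simp only [mem_pvStepB, List.mem_cons]
    constructor
    · rintro ((h | h) | ⟨p, hp, hc⟩)
      · exact Or.inl h
      · exact Or.inr ⟨q, Or.inl rfl, h⟩
      · exact Or.inr ⟨p, Or.inr hp, hc⟩
    · rintro (h | ⟨p, (rfl | hp), hc⟩)
      · exact Or.inl (Or.inl h)
      · exact Or.inl (Or.inr hc)
      · exact Or.inr ⟨p, hp, hc⟩

-- A NOUN position k lies in the promoted set iff one of its neighbours is PROPN
theorem k_mem_promoted_iff (s : List (String × String)) (k : Nat) (hk : k < s.length)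
    (hN : s[k].2 = "NOUN") :
    ((k : Int) ∈ (PySem.List.enumerate s 0).foldl (pvStepB s) PySem.Set.empty) ↔
      ((0 < (k : Int) ∧ (PySem.List.pyGetD s ((k : Int) - 1) ("", "")).2 = "PROPN") ∨
       ((k : Int) < (s.length : Int) - 1 ∧ (PySem.List.pyGetD s ((k : Int) + 1) ("", "")).2 = "PROPN")) := by
  rw [mem_foldl_pvStepB]
  constructor
  · rintro (h | ⟨p, hp, hPq, (⟨hj0, hNoun, hx⟩ | ⟨hjn, hNoun, hx⟩)⟩)
    · simp [PySem.Set.empty] at h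
    · rw [PySem.List.mem_enumerate_iff] at hp
      obtain ⟨j, hj, rfl⟩ := hp
      simp only [zero_add] at hPq hNoun hx hj0 ⊢
      refine Or.inr ⟨by omega, ?_⟩
      have hkj : (k : Int) + 1 = (j : Int) := by omega
      rw [hkj, PySem.List.pyGetD_natCast, List.getD_eq_getElem _ _ hj]
      exact hPq
    · rw [PySem.List.mem_enumerate_iff] at hp
      obtain ⟨j, hj, rfl⟩ := hp
      simp only [zero_add] at hPq hNoun hx hjn ⊢
      refine Or.inl ⟨by omega, ?_⟩
      have hkj : (k : Int) - 1 = (j : Int) := by omega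
      rw [hkj, PySem.List.pyGetD_natCast, List.getD_eq_getElem _ _ hj]
      exact hPq
  · rintro (⟨hk0, hPrev⟩ | ⟨hkn, hNext⟩)
    · refine Or.inr ⟨(((k - 1 : Nat) : Int), s[k - 1]'(by omega)), ?_, ?_, ?_⟩
      · rw [PySem.List.mem_enumerate_iff]
        exact ⟨k - 1, by omega, by simp⟩
      · have h1 : ((k : Int) - 1) = ((k - 1 : Nat) : Int) := by omega
        rw [h1, PySem.List.pyGetD_natCast, List.getD_eq_getElem _ _ (by omega : k - 1 < s.length)] at hPrev
        exact hPrev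
      · refine Or.inr ⟨by omega, ?_, by omega⟩
        have h2 : ((k - 1 : Nat) : Int) + 1 = (k : Int) := by omega
        rw [h2, PySem.List.pyGetD_natCast, List.getD_eq_getElem _ _ hk]
        exact hN
    · refine Or.inr ⟨(((k + 1 : Nat) : Int), s[k + 1]'(by omega)), ?_, ?_, ?_⟩
      · rw [PySem.List.mem_enumerate_iff]
        exact ⟨k + 1, by omega, by simp⟩
      · have h1 : ((k : Int) + 1) = ((k + 1 : Nat) : Int) := by omega
        rw [h1, PySem.List.pyGetD_natCast, List.getD_eq_getElem _ _ (by omega : k + 1 < s.length)] at hNext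
        exact hNext
      · refine Or.inl ⟨by omega, ?_, by omega⟩
        have h2 : ((k + 1 : Nat) : Int) - 1 = (k : Int) := by omega
        rw [h2, PySem.List.pyGetD_natCast, List.getD_eq_getElem _ _ hk]
        exact hN

-- ===== VERDICT (by name: the statement is the Claim_ definition above) =====
theorem multiword_entities_py_spec : Claim_equal_multiword_entities_py := by
  intro s _
  show multiword_entities_py s = multiword_entities_py_alt s
  simp only [multiword_entities_py, multiword_entities_py_alt,
    PySem.List.foldl_append_singleton_eq_map, List.nil_append]
  refine List.map_congr_left ?_
  intro p hp
  rw [PySem.List.mem_enumerate_iff] at hp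
  obtain ⟨k, hk, rfl⟩ := hp
  simp only [zero_add, Prod.mk.injEq, true_and]
  by_cases hN : s[k].2 = "NOUN"
  · have hmem := k_mem_promoted_iff s k hk hN
    by_cases hm : ((k : Int) ∈ (PySem.List.enumerate s 0).foldl (pvStepB s) PySem.Set.empty)
    · have hcont : PySem.Set.contains ((PySem.List.enumerate s 0).foldl (pvStepB s) PySem.Set.empty) (k : Int) = true :=
        (PySem.Set.contains_iff _ _).mpr hm
      rcases hmem.mp hm with ⟨h1, h2⟩ | ⟨h1, h2⟩
      · have h0 : 0 < k := by omega
        simp [hN, h0, h2]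
        exact hm
      · simp [hN, h1, h2]
        exact hm
    · have hcont : PySem.Set.contains ((PySem.List.enumerate s 0).foldl (pvStepB s) PySem.Set.empty) (k : Int) = false := by
        simp only [Bool.eq_false_iff, ne_eq, PySem.Set.contains_iff]
        exact hm
      have hnb1 : ¬ (0 < (k : Int) ∧ (PySem.List.pyGetD s ((k : Int) - 1) ("", "")).2 = "PROPN") :=
        fun h => hm (hmem.mpr (Or.inl h))
      have hnb2 : ¬ ((k : Int) < (s.length : Int) - 1 ∧ (PySem.List.pyGetD s ((k : Int) + 1) ("", "")).2 = "PROPN") :=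
        fun h => hm (hmem.mpr (Or.inr h))
      have h0 : ¬(0 < k ∧ (PySem.List.pyGetD s ((k : Int) - 1) ("", "")).2 = "PROPN") :=
        fun h => hnb1 ⟨by exact_mod_cast h.1, h.2⟩
      simp [hN]
      rw [if_neg (fun hc => hc.elim h0 hnb2)]
      exact (if_neg hm).symm
  · by_cases hP : s[k].2 = "PROPN"
    · simp [hP]
    · have hno : ¬ ((k : Int) ∈ (PySem.List.enumerate s 0).foldl (pvStepB s) PySem.Set.empty) := by
        rw [mem_foldl_pvStepB]
        rintro (h | ⟨p, hp, hPq, (⟨_, hn, hx⟩ | ⟨_, hn, hx⟩)⟩)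
        · simp [PySem.Set.empty] at h
        · rw [← hx, PySem.List.pyGetD_natCast, List.getD_eq_getElem _ _ hk] at hn
          exact hN hn
        · rw [← hx, PySem.List.pyGetD_natCast, List.getD_eq_getElem _ _ hk] at hn
          exact hN hn
      have hcont : PySem.Set.contains ((PySem.List.enumerate s 0).foldl (pvStepB s) PySem.Set.empty) (k : Int) = false := by
        simp only [Bool.eq_false_iff, ne_eq, PySem.Set.contains_iff]
        exact hno
      simp [hN, hP]
      exact hno
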